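-- pv_equiv track=rewrite | github.com/martysai/artificial-text-detection | detection/models/smr/sais.py | construct_type_array
-- ===== SOURCE A (Python) =====
-- def construct_type_array(string):
--     type_array = ['S']
--     for i in range(len(string) - 2, -1, -1):
--         if (string[i] < string[i + 1]) or (string[i] == string[i + 1] and type_array[-1] == 'S'):
--             type_array.append('S')
--         else:
--             type_array.append('L')
--
--     return list(reversed(type_array))
-- ===== SOURCE B (Python) =====
-- def construct_type_array(string):
--     # Forward run-based pass: run-length encode, then type each maximal run
--     # by comparing its character with the next run's character.
--     runs = []  # maximal runs as [char, count]
--     for ch in string: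
--         if runs and runs[-1][0] == ch:
--             runs[-1][1] += 1
--         else:
--             runs.append([ch, 1])
--     out = []
--     for idx in range(len(runs)):
--         ch, cnt = runs[idx]
--         t = 'S' if idx + 1 == len(runs) or ch < runs[idx + 1][0] else 'L'
--         out += [t] * cnt
--     return out
-- ===== Notes on version B (the rewrite author's own statement) =====
-- stated objective: alternative
-- what changed: Replaces the backward stateful scan (building types right-to-left with a trailing reversal) by a forward run-length encoding followed by typing each maximal run against the next run's character.
-- intended difference: On the empty string A returns ['S'] (the seeded accumulator leaks out, a length-1 type array for a length-0 string) while B returns [], the intended empty type array; on all other strings they agree. — e.g. on construct_type_array(""): A returns ["S"], B returns []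
import Mathlib
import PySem

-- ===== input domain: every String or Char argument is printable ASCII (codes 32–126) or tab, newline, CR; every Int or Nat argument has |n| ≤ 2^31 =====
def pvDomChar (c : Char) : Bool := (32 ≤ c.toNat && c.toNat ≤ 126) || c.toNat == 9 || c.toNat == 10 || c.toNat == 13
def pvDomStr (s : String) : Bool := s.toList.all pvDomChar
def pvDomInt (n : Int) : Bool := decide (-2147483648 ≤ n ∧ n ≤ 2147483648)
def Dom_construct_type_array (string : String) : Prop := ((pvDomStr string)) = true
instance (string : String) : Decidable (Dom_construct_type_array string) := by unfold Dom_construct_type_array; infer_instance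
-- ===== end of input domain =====

-- B replaces A's backward stateful scan by a forward run-length-encode-then-type pass;
-- it differs from A only on "": A returns ["S"] there, B returns [].

-- ===== PORT A =====
-- the loop body of A: compare string[i] with string[i+1], peek type_array[-1]
def aStep (s : List Char) (ta : List String) (i : Int) : List String :=
  if PySem.List.pyGetD s i ' ' < PySem.List.pyGetD s (i + 1) ' ' ∨
     (PySem.List.pyGetD s i ' ' = PySem.List.pyGetD s (i + 1) ' ' ∧
      PySem.List.pyGetD ta (-1) "" = "S")
  then ta ++ ["S"] else ta ++ ["L"]

def construct_type_array (string : String) : List String :=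
  let s := string.toList
  let ta := (PySem.List.pyRange ((s.length : Int) - 2) (-1) (-1)).foldl (aStep s) ["S"]
  ta.reverse

-- ===== PORT B =====
-- run-length-encoding loop body: extend the last run or start a new one
def bStep (runs : List (Char × Nat)) (ch : Char) : List (Char × Nat) :=
  match runs.getLast? with
  | some (c, k) => if c = ch then runs.dropLast ++ [(c, k + 1)] else runs ++ [(ch, 1)]
  | none => [(ch, 1)]

-- typing loop over the runs, peeking at the next run
def bTypes : List (Char × Nat) → List String
  | [] => []
  | (c, k) :: rest =>
      let t := match rest with
               | [] => "S"
               | (d, _) :: _ => if c < d then "S" else "L"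
      List.replicate k t ++ bTypes rest

def construct_type_array_alt (string : String) : List String :=
  bTypes (string.toList.foldl bStep [])

-- ===== PRECONDITION & SPEC =====
-- On "" A returns ["S"] (a length-1 type array for a length-0 string, leaked from the
-- seeded accumulator); B returns [], the intended empty type array.
def D_construct_type_array (string : String) : Prop := string = ""
instance (string : String) : Decidable (D_construct_type_array string) := by
  unfold D_construct_type_array; infer_instance

def Spec_construct_type_array (string : String) (out : List String) : Prop :=
  ¬ D_construct_type_array string → out = construct_type_array_alt string
instance (string : String) (out : List String) : Decidable (Spec_construct_type_array string out) := by
  unfold Spec_construct_type_array; infer_instance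

def pvDiffWitness_construct_type_array : String := ""
def pvDiffWitnessOut_construct_type_array : (List String) × (List String) := (["S"], [])

-- ===== CLAIM (what is proved, stated in full; the proofs are below) =====
def Claim_unchanged_construct_type_array : Prop := ∀ (string : String), Dom_construct_type_array string → Spec_construct_type_array string (construct_type_array string)
def Claim_changed_construct_type_array : Prop := Dom_construct_type_array (pvDiffWitness_construct_type_array) ∧ D_construct_type_array (pvDiffWitness_construct_type_array) ∧ construct_type_array (pvDiffWitness_construct_type_array) = pvDiffWitnessOut_construct_type_array.1 ∧ construct_type_array_alt (pvDiffWitness_construct_type_array) = pvDiffWitnessOut_construct_type_array.2 ∧ pvDiffWitnessOut_construct_type_array.1 ≠ pvDiffWitnessOut_construct_type_array.2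
def Claim_exact_construct_type_array : Prop := ∀ (string : String), Dom_construct_type_array string → D_construct_type_array string → construct_type_array string ≠ construct_type_array_alt string

-- ===== LEMMAS AND PROOFS =====

-- reference recursion: the type of position 0 in terms of the next position's type
def refA : List Char → List String
  | [] => []
  | [_] => ["S"]
  | c :: d :: t =>
      (if c < d ∨ (c = d ∧ (refA (d :: t)).headD "" = "S") then "S" else "L") :: refA (d :: t)

theorem refA_ne_nil (l : List Char) (h : l ≠ []) : refA l ≠ [] := by
  match l with
  | [_] => simp [refA]
  | _ :: _ :: _ => simp [refA]

theorem refA_head (c : Char) (t : List Char) :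
    (refA (c :: t)).headD "" = "S" ∨ (refA (c :: t)).headD "" = "L" := by
  rcases t with _ | ⟨d, t⟩
  · simp [refA]
  · simp only [refA, List.headD_cons]
    split_ifs <;> simp

-- ---- A = refA ----

theorem aFold_eq (l : List Char) (i : Nat) (hi : i < l.length) :
    (PySem.List.pyRange ((i : Int) - 1) (-1) (-1)).foldl (aStep l) (refA (l.drop i)).reverse
      = (refA l).reverse := by
  induction i with
  | zero => simp [PySem.List.pyRange_neg_one_eq_nil]
  | succ i ih =>
    rw [show (((i + 1 : Nat) : Int) - 1) = (i : Int) by push_cast; ring,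
        PySem.List.pyRange_neg_one_cons (by omega : (-1 : Int) < i)]
    have e1 : l.drop i = l[i]'(by omega) :: l.drop (i + 1) := List.drop_eq_getElem_cons (by omega)
    have e2 : l.drop (i + 1) = l[i + 1]'hi :: l.drop (i + 2) := List.drop_eq_getElem_cons hi
    have hstep : aStep l (refA (l.drop (i + 1))).reverse (i : Int)
        = (refA (l.drop i)).reverse := by
      have h1 : PySem.List.pyGetD l (i : Int) ' ' = l[i]'(by omega) := by
        rw [PySem.List.pyGetD_natCast]; simp [show i < l.length by omega]
      have h2 : PySem.List.pyGetD l ((i : Int) + 1) ' ' = l[i + 1]'hi := by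
        rw [show ((i : Int) + 1) = ((i + 1 : Nat) : Int) by push_cast; ring,
            PySem.List.pyGetD_natCast]
        simp [hi]
      have hne2 : refA (l.drop (i + 1)) ≠ [] :=
        refA_ne_nil _ (by simp [List.drop_eq_nil_iff]; omega)
      have h3 : PySem.List.pyGetD (refA (l.drop (i + 1))).reverse (-1) ""
          = (refA (l.drop (i + 1))).headD "" := by
        rcases hr : refA (l.drop (i + 1)) with _ | ⟨x, xs⟩
        · exact absurd hr hne2
        · rw [PySem.List.pyGetD_neg_one _ _ (by simp)]
          have h4 : (x :: xs).reverse.getLast? = some x := by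
            simp [List.getLast?_reverse]
          rw [List.getLast?_eq_getLast_of_ne_nil (by simp)] at h4
          rw [Option.some.inj h4, List.headD_cons]
      rw [e1]
      conv_rhs => rw [e2]
      simp only [refA, aStep, h1, h2, h3, ← e2, List.reverse_cons]
      split_ifs with hc <;> rfl
    rw [List.foldl_cons, hstep, ih (by omega)]

theorem a_eq_refA (l : List Char) (h : l ≠ []) :
    ((PySem.List.pyRange ((l.length : Int) - 2) (-1) (-1)).foldl (aStep l) ["S"]).reverse
      = refA l := by
  have hl : 1 ≤ l.length := List.length_pos_iff.mpr h
  have hdrop : l.drop (l.length - 1) = [l[l.length - 1]'(by omega)] := by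
    rw [List.drop_eq_getElem_cons (by omega)]
    simp [Nat.sub_add_cancel hl]
  have hfold := aFold_eq l (l.length - 1) (by omega)
  rw [hdrop] at hfold
  rw [show ((l.length : Int) - 2) = (((l.length - 1 : Nat) : Int) - 1) by
        push_cast [hl]; ring]
  simp only [refA, List.reverse_singleton] at hfold
  simpa using congrArg List.reverse hfold

-- ---- B = refA ----

theorem bStep_prefix (s : List Char) (a rs : List (Char × Nat)) (hrs : rs ≠ []) :
    s.foldl bStep (a ++ rs) = a ++ s.foldl bStep rs := by
  induction s generalizing rs with
  | nil => rfl
  | cons ch t ih =>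
    rcases List.exists_cons_of_ne_nil hrs with ⟨r, rs', rfl⟩
    rcases hlast : (r :: rs').getLast? with _ | ⟨c, k⟩
    · simp at hlast
    · have h1 : (a ++ r :: rs').getLast? = some (c, k) := by
        rw [List.getLast?_append, hlast]; rfl
      have h2 : (a ++ r :: rs').dropLast = a ++ (r :: rs').dropLast := by
        rw [List.dropLast_append_of_ne_nil]; simp
      simp only [List.foldl_cons, bStep, h1, h2, hlast]
      split_ifs with hc
      · rw [List.append_assoc, ih _ (by simp)]
      · rw [List.append_assoc, ih _ (by simp)]

theorem bFold_shape (s : List Char) (c : Char) (k : Nat) :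
    ∃ k' rs, s.foldl bStep [(c, k)] = (c, k') :: rs := by
  induction s generalizing k with
  | nil => exact ⟨k, [], rfl⟩
  | cons d t ih =>
    by_cases hc : c = d
    · subst hc
      simpa [bStep] using ih (k + 1)
    · rw [List.foldl_cons, show bStep [(c, k)] d = [(c, k)] ++ [(d, 1)] by
        simp [bStep, hc],
        bStep_prefix t [(c, k)] [(d, 1)] (by simp)]
      exact ⟨k, _, rfl⟩

theorem bFold_types (s : List Char) (c : Char) (k : Nat) (hk : 1 ≤ k) :
    bTypes (s.foldl bStep [(c, k)])
      = List.replicate (k - 1) ((refA (c :: s)).headD "") ++ refA (c :: s) := by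
  induction s generalizing c k with
  | nil =>
    simp [bTypes, refA]
    rw [← List.replicate_succ', Nat.sub_add_cancel hk]
  | cons d t ih =>
    by_cases hc : c = d
    · subst hc
      rw [List.foldl_cons, show bStep [(c, k)] c = [(c, k + 1)] by simp [bStep],
          ih c (k + 1) (by omega)]
      have hcons : refA (c :: c :: t) = (refA (c :: t)).headD "" :: refA (c :: t) := by
        conv_lhs => simp only [refA]
        rcases refA_head c t with h | h <;> rw [h] <;> simp
      have hh : (refA (c :: c :: t)).headD "" = (refA (c :: t)).headD "" := by
        rw [hcons, List.headD_cons]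
      rw [hh, hcons, Nat.add_sub_cancel]
      rw [show List.replicate (k - 1) ((refA (c :: t)).headD "") ++
            ((refA (c :: t)).headD "" :: refA (c :: t))
          = (List.replicate (k - 1) ((refA (c :: t)).headD "") ++
             [(refA (c :: t)).headD ""]) ++ refA (c :: t) by simp]
      rw [← List.replicate_succ', Nat.sub_add_cancel hk]
    · rw [List.foldl_cons, show bStep [(c, k)] d = [(c, k)] ++ [(d, 1)] by simp [bStep, hc],
          bStep_prefix t [(c, k)] [(d, 1)] (by simp)]
      rcases bFold_shape t d 1 with ⟨k', rs, hsh⟩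
      have iht := ih d 1 (by omega)
      have hT : refA (c :: d :: t) = (if c < d then "S" else "L") :: refA (d :: t) := by
        simp only [refA]
        split_ifs with h1 h2 h2 <;> simp_all
      rw [hsh]
      rw [hsh] at iht
      simp only [List.replicate_zero, List.nil_append, Nat.sub_self] at iht
      show bTypes ((c, k) :: (d, k') :: rs)
          = List.replicate (k - 1) ((refA (c :: d :: t)).headD "") ++ refA (c :: d :: t)
      simp only [hT, List.headD_cons]
      rw [← iht]
      simp only [bTypes]
      conv_lhs => rw [show k = (k - 1) + 1 by omega]
      rw [List.replicate_succ', List.append_assoc, List.singleton_append]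

theorem b_eq_refA (l : List Char) :
    bTypes (l.foldl bStep []) = refA l := by
  rcases l with _ | ⟨c, t⟩
  · simp [bTypes, refA]
  · rw [List.foldl_cons, show bStep [] c = [(c, 1)] by rfl, bFold_types t c 1 (by omega)]
    simp

-- ===== VERDICT (by name: the statement is the Claim_ definition above) =====
theorem construct_type_array_spec : Claim_unchanged_construct_type_array := by
  intro s _ hD
  have hne : s.toList ≠ [] := by
    intro h
    exact hD (by unfold D_construct_type_array; exact String.toList_eq_nil_iff.mp h)
  show construct_type_array s = construct_type_array_alt s
  unfold construct_type_array construct_type_array_alt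
  rw [b_eq_refA, a_eq_refA _ hne]

theorem construct_type_array_changed : Claim_changed_construct_type_array := by
  unfold Claim_changed_construct_type_array; decide

theorem construct_type_array_tight : Claim_exact_construct_type_array := by
  intro s _ hD
  have hs : s = "" := hD
  subst hs
  decide
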